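-- pv_equiv track=rewrite | github.com/FrenchCommando/advent_of_code | 2023/day11.py | compute
-- ===== SOURCE A (Python) =====
-- def compute(grid, zero_gap=2):
--     counts = [line.count("#") for line in grid]
--     result = 0
--     current_n = 0
--     current_d = 0
--     for c in counts:
--         result += c * current_d
--         current_n += c
--         current_d += current_n * (zero_gap if c == 0 else 1)
--     return result
-- ===== SOURCE B (Python) =====
-- def compute(grid, zero_gap=2):
--     counts = [line.count("#") for line in grid]
--     coords = []
--     pos = 0
--     for c in counts:
--         coords.append(pos)
--         pos += zero_gap if c == 0 else 1
--     pairs = list(zip(counts, coords))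
--     total = 0
--     while pairs:
--         c0, x0 = pairs.pop(0)
--         for c, x in pairs:
--             total += c0 * c * (x - x0)
--     return total
-- ===== Notes on version B (the rewrite author's own statement) =====
-- stated objective: alternative
-- what changed: B first materialises an expanded-coordinate list (advancing by zero_gap on empty rows, 1 otherwise) and then sums counts[i]*counts[j]*(coords[j]-coords[i]) over all pairs i<j with an explicit pairwise loop, instead of A's single incremental running-sum pass.
import Mathlib
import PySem

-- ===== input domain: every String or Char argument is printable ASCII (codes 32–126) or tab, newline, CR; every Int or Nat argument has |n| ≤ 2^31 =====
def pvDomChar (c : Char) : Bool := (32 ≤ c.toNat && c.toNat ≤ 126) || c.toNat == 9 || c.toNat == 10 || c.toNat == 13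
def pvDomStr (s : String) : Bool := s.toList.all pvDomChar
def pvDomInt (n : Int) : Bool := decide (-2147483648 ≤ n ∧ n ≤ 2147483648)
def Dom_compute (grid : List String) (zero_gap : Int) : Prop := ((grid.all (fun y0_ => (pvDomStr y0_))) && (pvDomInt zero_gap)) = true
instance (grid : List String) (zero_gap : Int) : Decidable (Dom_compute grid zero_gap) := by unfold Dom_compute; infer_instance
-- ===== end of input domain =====

-- B replaces A's incremental running-sum pass by an explicit expanded-coordinate list plus a
-- direct pairwise double loop (objective: alternative decomposition; not faster).

-- ===== PORT A =====
def compute (grid : List String) (zero_gap : Int) : Int :=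
  let counts : List Int := grid.map (fun line => (PySem.Str.count line "#" : Int))
  let st := counts.foldl
    (fun (s : Int × Int × Int) c =>
      let result := s.1 + c * s.2.2
      let current_n := s.2.1 + c
      let current_d := s.2.2 + current_n * (if c == 0 then zero_gap else 1)
      (result, current_n, current_d))
    (0, 0, 0)
  st.1

-- ===== PORT B =====
-- the 'while pairs: c0, x0 = pairs.pop(0); for c, x in pairs: …' loop of Source B
def pairLoop : List (Int × Int) → Int → Int
  | [], total => total
  | (c0, x0) :: rest, total =>
      pairLoop rest (rest.foldl (fun t p => t + c0 * p.1 * (p.2 - x0)) total)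

def compute_alt (grid : List String) (zero_gap : Int) : Int :=
  let counts : List Int := grid.map (fun line => (PySem.Str.count line "#" : Int))
  let cp := counts.foldl
    (fun (s : List Int × Int) c =>
      (s.1 ++ [s.2], s.2 + (if c == 0 then zero_gap else 1)))
    ([], 0)
  let coords := cp.1
  let pairs := counts.zip coords
  pairLoop pairs 0

-- ===== PRECONDITION & SPEC =====
def Spec_compute (grid : List String) (zero_gap : Int) (out : Int) : Prop := out = compute_alt grid zero_gap
instance (grid : List String) (zero_gap : Int) (out : Int) : Decidable (Spec_compute grid zero_gap out) := by unfold Spec_compute; infer_instance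

-- ===== CLAIM (what is proved, stated in full; the proofs are below) =====
def Claim_equal_compute : Prop := ∀ (grid : List String) (zero_gap : Int), Dom_compute grid zero_gap → Spec_compute grid zero_gap (compute grid zero_gap)

-- ===== LEMMAS AND PROOFS =====

-- per-row coordinate step
def stepOf (zg c : Int) : Int := if c == 0 then zg else 1

-- total number of '#' in the list
def csum : List Int → Int
  | [] => 0
  | c :: cs => c + csum cs

-- Σ c_i * x_i with coordinates local to the list (first row at 0)
def wsum (zg : Int) : List Int → Int
  | [] => 0
  | c :: cs => stepOf zg c * csum cs + wsum zg cs

-- the weighted pairwise-distance sum Σ_{i<j} c_i c_j (x_j - x_i)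
def fsum (zg : Int) : List Int → Int
  | [] => 0
  | c :: cs => c * (stepOf zg c * csum cs + wsum zg cs) + fsum zg cs

-- coordinate list starting at pos
def coordsFrom (zg pos : Int) : List Int → List Int
  | [] => []
  | c :: cs => pos :: coordsFrom zg (pos + stepOf zg c) cs

theorem foldA_eq (zg : Int) (cs : List Int) : ∀ (res n d : Int),
    (cs.foldl (fun (s : Int × Int × Int) c =>
        (s.1 + c * s.2.2, s.2.1 + c,
         s.2.2 + (s.2.1 + c) * (if c == 0 then zg else 1))) (res, n, d)).1
      = res + n * wsum zg cs + fsum zg cs + d * csum cs := by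
  induction cs with
  | nil => intro res n d; simp [csum, wsum, fsum]
  | cons c cs ih =>
    intro res n d
    simp only [List.foldl_cons, csum, wsum, fsum, stepOf]
    rw [ih]
    ring

theorem coordsFold_eq (zg : Int) (cs : List Int) : ∀ (acc : List Int) (pos : Int),
    (cs.foldl (fun (s : List Int × Int) c =>
        (s.1 ++ [s.2], s.2 + (if c == 0 then zg else 1))) (acc, pos)).1
      = acc ++ coordsFrom zg pos cs := by
  induction cs with
  | nil => intro acc pos; simp [coordsFrom]
  | cons c cs ih =>
    intro acc pos
    simp only [List.foldl_cons, coordsFrom, stepOf]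
    rw [ih]
    simp

theorem innerFold_eq (zg c0 x0 : Int) (cs : List Int) : ∀ (q acc : Int),
    ((cs.zip (coordsFrom zg q cs)).foldl (fun t p => t + c0 * p.1 * (p.2 - x0)) acc)
      = acc + c0 * ((q - x0) * csum cs + wsum zg cs) := by
  induction cs with
  | nil => intro q acc; simp [csum, wsum, coordsFrom]
  | cons c cs ih =>
    intro q acc
    simp only [coordsFrom, List.zip_cons_cons, List.foldl_cons, csum, wsum]
    rw [ih]
    ring

theorem pairLoop_eq (zg : Int) (cs : List Int) : ∀ (pos total : Int),
    pairLoop (cs.zip (coordsFrom zg pos cs)) total = total + fsum zg cs := by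
  induction cs with
  | nil => intro pos total; simp [pairLoop, coordsFrom, fsum]
  | cons c cs ih =>
    intro pos total
    simp only [coordsFrom, List.zip_cons_cons, pairLoop, fsum]
    rw [innerFold_eq, ih]
    ring

-- ===== VERDICT (by name: the statement is the Claim_ definition above) =====
theorem compute_spec : Claim_equal_compute := by
  intro grid zero_gap _
  unfold Spec_compute compute compute_alt
  simp only
  rw [foldA_eq, coordsFold_eq, List.nil_append, pairLoop_eq]
  ring
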